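-- pv_equiv track=rewrite | github.com/blackjack2015/NV-DVFS-Benchmark | ptx_tools/gpuPTXParser.py | count_dtype
-- ===== SOURCE A (Python) =====
-- def count_dtype(sequence_per_kernel, inst_types):
--
--     dtype_per_kernel = []
--     for sequence in sequence_per_kernel:
--         dtype_stats = []
--         for inst_type in inst_types:
--             stat_inst = [inst for inst in sequence if inst_type in inst]
--             dtype_stats.append(len(stat_inst))
--         dtype_per_kernel.append(dtype_stats)
--
--     return dtype_per_kernel
-- ===== SOURCE B (Python) =====
-- def count_dtype(sequence_per_kernel, inst_types):
--     result = []
--     for sequence in sequence_per_kernel: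
--         # frequency table of distinct instructions: each distinct string is
--         # tested against the patterns once, weighted by its multiplicity
--         freq = {}
--         for inst in sequence:
--             freq[inst] = freq.get(inst, 0) + 1
--         counts = [0] * len(inst_types)
--         for inst, m in freq.items():
--             counts = [c + m if t in inst else c
--                       for c, t in zip(counts, inst_types)]
--         result.append(counts)
--     return result
-- ===== Notes on version B (the rewrite author's own statement) =====
-- stated objective: alternative
-- what changed: B first builds a frequency dictionary of the distinct instructions in each sequence and then runs the substring tests once per DISTINCT instruction, adding its multiplicity to a position-indexed counts row, instead of A's fresh full scan of the sequence for every type.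
import Mathlib
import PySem

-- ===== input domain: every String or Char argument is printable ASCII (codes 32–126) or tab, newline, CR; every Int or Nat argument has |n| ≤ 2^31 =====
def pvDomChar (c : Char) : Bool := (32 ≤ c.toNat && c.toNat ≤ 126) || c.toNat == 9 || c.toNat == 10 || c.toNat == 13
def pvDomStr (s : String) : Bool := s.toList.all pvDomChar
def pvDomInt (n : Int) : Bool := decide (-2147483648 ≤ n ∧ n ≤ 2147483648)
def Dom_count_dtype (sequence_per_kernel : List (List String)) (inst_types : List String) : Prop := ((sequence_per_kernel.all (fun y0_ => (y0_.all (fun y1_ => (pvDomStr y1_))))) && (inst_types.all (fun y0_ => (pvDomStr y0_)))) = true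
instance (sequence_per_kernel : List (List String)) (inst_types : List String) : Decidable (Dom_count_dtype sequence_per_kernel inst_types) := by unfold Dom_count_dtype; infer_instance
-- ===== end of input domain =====

-- B builds a frequency dictionary of each sequence's distinct instructions and runs
-- the substring tests once per distinct instruction, weighted by multiplicity
-- (alternative decomposition).


-- ===== PORT A =====
def count_dtype (sequence_per_kernel : List (List String)) (inst_types : List String) : List (List Int) :=
  sequence_per_kernel.foldl (fun dtype_per_kernel sequence =>
    dtype_per_kernel ++
      [inst_types.foldl (fun dtype_stats inst_type =>
        dtype_stats ++ [((sequence.filter (fun inst => PySem.Str.isIn inst_type inst)).length : Int)]) []]) []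

-- ===== PORT B =====
def count_dtype_alt (sequence_per_kernel : List (List String)) (inst_types : List String) : List (List Int) :=
  sequence_per_kernel.foldl (fun result sequence =>
    let freq : PySem.Dict String Int :=
      sequence.foldl (fun f inst => f.insert inst (f.getD inst 0 + 1)) PySem.Dict.empty
    let counts :=
      freq.items.foldl (fun counts pm =>
        (counts.zip inst_types).map (fun ct => if PySem.Str.isIn ct.2 pm.1 then ct.1 + pm.2 else ct.1))
        (List.replicate inst_types.length (0 : Int))
    result ++ [counts]) []

-- ===== PRECONDITION & SPEC =====
def Spec_count_dtype (sequence_per_kernel : List (List String)) (inst_types : List String) (out : List (List Int)) : Prop := out = count_dtype_alt sequence_per_kernel inst_types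
instance (sequence_per_kernel : List (List String)) (inst_types : List String) (out : List (List Int)) : Decidable (Spec_count_dtype sequence_per_kernel inst_types out) := by unfold Spec_count_dtype; infer_instance

-- ===== CLAIM (what is proved, stated in full; the proofs are below) =====
def Claim_equal_count_dtype : Prop := ∀ (sequence_per_kernel : List (List String)) (inst_types : List String), Dom_count_dtype sequence_per_kernel inst_types → Spec_count_dtype sequence_per_kernel inst_types (count_dtype sequence_per_kernel inst_types)

-- ===== LEMMAS AND PROOFS =====

theorem zip_map_self {α β : Type} (g : α → β) (l : List α) :
    (l.map g).zip l = l.map (fun t => (g t, t)) := by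
  induction l with
  | nil => rfl
  | cons x xs ih => simp [ih]

-- B's items loop invariant: from a state of shape types.map g, each (inst, m) item
-- adds m pointwise to the slots whose type matches inst.
theorem b_items_fold (q : String → String → Bool) (types : List String)
    (l : List (String × Int)) (g : String → Int) :
    l.foldl (fun counts pm =>
      (counts.zip types).map (fun ct => if q ct.2 pm.1 then ct.1 + pm.2 else ct.1))
      (types.map g)
    = types.map (fun t => g t + (l.map (fun pm => if q t pm.1 then pm.2 else 0)).sum) := by
  induction l generalizing g with
  | nil => simp
  | cons pm rest ih =>
    rw [List.foldl_cons, zip_map_self g types, List.map_map]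
    have hstep : ((fun ct : Int × String => if q ct.2 pm.1 then ct.1 + pm.2 else ct.1) ∘
        fun t => (g t, t)) = fun t => if q t pm.1 then g t + pm.2 else g t := by
      funext t; by_cases h : q t pm.1 = true <;> simp [Function.comp, h]
    rw [hstep]
    have := ih (g := fun t => if q t pm.1 then g t + pm.2 else g t)
    rw [this]
    apply List.map_congr_left
    intro t _
    by_cases h : q t pm.1 = true <;> simp [h]
    ring

-- summing over a Nodup list: only the entry equal to x contributes.
theorem sum_single_hit (s : List String) (x : String) (c : String → Int)
    (hnd : s.Nodup) (hx : x ∈ s) :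
    (s.map (fun k => if k = x then c k else 0)).sum = c x := by
  induction s with
  | nil => cases hx
  | cons a s ih =>
    rcases List.nodup_cons.mp hnd with ⟨ha, hnd'⟩
    rcases List.mem_cons.mp hx with h | hx'
    · subst h
      have hz : ∀ y ∈ List.map (fun k => if k = x then c k else 0) s, y = 0 := by
        intro y hy
        rcases List.mem_map.mp hy with ⟨k, hk, rfl⟩
        have : k ≠ x := by rintro rfl; exact ha hk
        simp [this]
      simp [List.sum_eq_zero hz]
    · have hax : a ≠ x := by rintro rfl; exact ha hx'
      simp [hax, ih hnd' hx']

-- count decomposition: the filtered length of l is the sum over any Nodup superset s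
-- of its support of (if p k then l.count k else 0).
theorem countP_eq_sum_over_support (l : List String) (p : String → Bool)
    (s : List String) (hnd : s.Nodup) (hsub : ∀ y ∈ l, y ∈ s) :
    (s.map (fun k => if p k then (l.count k : Int) else 0)).sum = (l.countP p : Int) := by
  induction l with
  | nil => simp
  | cons x l ih =>
    have hx : x ∈ s := hsub x (List.mem_cons_self)
    have hsub' : ∀ y ∈ l, y ∈ s := fun y hy => hsub y (List.mem_cons_of_mem _ hy)
    have hsplit : (fun k => if p k then ((x :: l).count k : Int) else 0)
        = fun k => (if p k then (l.count k : Int) else 0) + (if k = x then (if p k then 1 else 0) else 0) := by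
      funext k
      by_cases hpk : p k = true
      · by_cases hkx : k = x
        · subst hkx; simp [hpk, List.count_cons_self]
        · have : x ≠ k := fun h => hkx h.symm
          simp [hpk, hkx, List.count_cons_of_ne this]
      · simp [hpk]
    rw [hsplit]
    have hadd : (s.map (fun k => (if p k then (l.count k : Int) else 0) + (if k = x then (if p k then 1 else 0) else 0))).sum
        = (s.map (fun k => if p k then (l.count k : Int) else 0)).sum
          + (s.map (fun k => if k = x then (if p k then 1 else 0) else 0)).sum := by
      rw [← List.sum_map_add]
    rw [hadd, ih hsub', sum_single_hit s x _ hnd hx]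
    by_cases hpx : p x = true <;> simp [hpx]

-- B's per-sequence row equals A's per-sequence row.
theorem row_eq (types : List String) (seq : List String) :
    (PySem.Dict.counter seq).items.foldl (fun counts pm =>
        (counts.zip types).map (fun ct => if PySem.Str.isIn ct.2 pm.1 then ct.1 + pm.2 else ct.1))
        (List.replicate types.length (0 : Int))
    = types.map (fun t => ((seq.filter (fun inst => PySem.Str.isIn t inst)).length : Int)) := by
  have hrep : List.replicate types.length (0 : Int) = types.map (fun _ => (0 : Int)) := by
    simp [List.map_const']
  rw [hrep, b_items_fold, PySem.Dict.items_counter]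
  apply List.map_congr_left
  intro t _
  rw [List.map_map]
  have hcomp : ((fun pm : String × Int => if PySem.Str.isIn t pm.1 then pm.2 else 0) ∘
      fun k => (k, (seq.count k : Int)))
      = fun k => if PySem.Str.isIn t k then (seq.count k : Int) else 0 := by
    funext k; simp [Function.comp]
  rw [hcomp, zero_add, countP_eq_sum_over_support seq (fun inst => PySem.Str.isIn t inst)
        (PySem.Set.ofList seq) (PySem.Set.nodup_ofList seq)
        (fun y hy => (PySem.Set.mem_ofList seq y).mpr hy)]
  simp [List.countP_eq_length_filter]

-- ===== VERDICT (by name: the statement is the Claim_ definition above) =====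
theorem count_dtype_spec : Claim_equal_count_dtype := by
  intro sk types _
  unfold Spec_count_dtype count_dtype count_dtype_alt
  simp only [PySem.Dict.foldl_insert_getD_add_one_eq_counter]
  rw [PySem.List.foldl_append_singleton_eq_map, PySem.List.foldl_append_singleton_eq_map]
  apply List.map_congr_left
  intro seq _
  rw [PySem.List.foldl_append_singleton_eq_map, row_eq]
  simp
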